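-- pv_equiv track=rewrite | github.com/VITAMIN-organisation/vitamin-model-checker | model_checker/benchmarking/generators.py | generate_cost_cgs_linear_chain_content
-- ===== SOURCE A (Python) =====
-- NL = "\n"
--
-- def _state_names(num_states):
--     return [f"s{i}" for i in range(num_states)]
--
-- def _unknown_transitions_grid(num_states):
--     row = " ".join(["0"] * num_states)
--     return [row] * num_states
--
-- def _format_cgs_body(
--     transitions,
--     unknown_transitions,
--     states,
--     atomic_propositions,
--     labelling,
--     num_agents,
--     costs_for_actions=None,
--     extra_after_labelling=None,
-- ):
--     parts = [
--         "Transition",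
--         NL.join(transitions),
--         "Unknown_Transition_by",
--         NL.join(unknown_transitions),
--         "Name_State",
--         " ".join(states),
--         "Initial_State",
--         "s0",
--     ]
--     if costs_for_actions is not None:
--         parts.append("Costs_for_actions")
--         parts.append(costs_for_actions)
--     parts.extend(
--         [
--             "Atomic_propositions",
--             atomic_propositions,
--             "Labelling",
--             NL.join(labelling),
--         ]
--     )
--     if extra_after_labelling:
--         parts.append(extra_after_labelling)
--     parts.extend(["Number_of_agents", str(num_agents)])
--     return NL.join(parts) + NL
--
-- def generate_cost_cgs_linear_chain_content(num_states, num_agents=2, prop_names=None):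
--     if prop_names is None:
--         prop_names = ["p"]
--
--     states = _state_names(num_states)
--     transitions = []
--     unknown_transitions = _unknown_transitions_grid(num_states)
--
--     for i in range(num_states):
--         row = []
--         for j in range(num_states):
--             if j == i + 1:
--                 action = "AC" * num_agents
--                 row.append(action)
--             elif j == i:
--                 row.append("*" if i == num_states - 1 else "0")
--             else:
--                 row.append("0")
--         transitions.append(" ".join(row))
--
--     labelling = [["0"] * len(prop_names) for _ in range(num_states)]
--     labelling[0][0] = "1"
--     labelling[-1][0] = "1"
--     labelling_str = [" ".join(row) for row in labelling]
--
--     base_action = "AC" * num_agents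
--     cost_str = ":".join(["1"] * num_agents)
--     action_costs = {}
--     for i in range(num_states - 1):
--         state_name = f"s{i}"
--         if base_action not in action_costs:
--             action_costs[base_action] = []
--         action_costs[base_action].append(f"{state_name}${cost_str}")
--     action_costs["*"] = [f"s{num_states - 1}${cost_str}"]
--     costs_lines = NL.join(
--         [
--             f"{action} {';'.join(cost_list)}"
--             for action, cost_list in action_costs.items()
--         ]
--     )
--
--     return _format_cgs_body(
--         transitions,
--         unknown_transitions,
--         states,
--         " ".join(prop_names),
--         labelling_str,
--         num_agents,
--         costs_for_actions=costs_lines,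
--     )
-- ===== SOURCE B (Python) =====
-- NL = "\n"
--
-- def generate_cost_cgs_linear_chain_content(num_states, num_agents=2, prop_names=None):
--     n = num_states
--     act = "AC" * num_agents
--     cost = ("1:" * num_agents)[:-1]
--     trans = NL.join(
--         f'{"0 " * (n - 1)}*' if i == n - 1 else f'{"0 " * (i + 1)}{act}{" 0" * (n - 2 - i)}'
--         for i in range(n)
--     )
--     zero_row = ("0 " * n)[:-1]
--     unknown = ((zero_row + NL) * n)[:-1]
--     states = ("".join(" s%d" % i for i in range(n)))[1:]
--     star_line = "* s%d$%s" % (n - 1, cost)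
--     if n > 1:
--         costs = (act + " " + ("".join("s%d$%s;" % (i, cost) for i in range(n - 1)))[:-1]
--                  + NL + star_line)
--     else:
--         costs = star_line
--     if prop_names is None:
--         props, p = "p", 1
--     else:
--         props, p = " ".join(prop_names), len(prop_names)
--     marked = "1" + " 0" * (p - 1)
--     plain = "0" + " 0" * (p - 1)
--     labels = marked if n == 1 else marked + NL + ((plain + NL) * (n - 2)) + marked
--     return ("Transition" + NL + trans + NL + "Unknown_Transition_by" + NL + unknown + NL
--             + "Name_State" + NL + states + NL + "Initial_State" + NL + "s0" + NL
--             + "Costs_for_actions" + NL + costs + NL + "Atomic_propositions" + NL + props + NL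
--             + "Labelling" + NL + labels + NL + "Number_of_agents" + NL + str(num_agents) + NL)
-- ===== Notes on version B (the rewrite author's own statement) =====
-- stated objective: alternative
-- what changed: B replaces A's nested per-cell loops and dict accumulation with closed-form string arithmetic: each transition row is '0 '*(i+1)+action+' 0'*(n-2-i), the zero row, labelling rows and cost string are precomputed strings replicated by string multiplication with a trailing-separator strip such as ((row+'\n')*n)[:-1], cost entries are built semicolon-terminated and stripped, and the document is one literal concatenation instead of A's parts-list join helper.
import Mathlib
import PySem

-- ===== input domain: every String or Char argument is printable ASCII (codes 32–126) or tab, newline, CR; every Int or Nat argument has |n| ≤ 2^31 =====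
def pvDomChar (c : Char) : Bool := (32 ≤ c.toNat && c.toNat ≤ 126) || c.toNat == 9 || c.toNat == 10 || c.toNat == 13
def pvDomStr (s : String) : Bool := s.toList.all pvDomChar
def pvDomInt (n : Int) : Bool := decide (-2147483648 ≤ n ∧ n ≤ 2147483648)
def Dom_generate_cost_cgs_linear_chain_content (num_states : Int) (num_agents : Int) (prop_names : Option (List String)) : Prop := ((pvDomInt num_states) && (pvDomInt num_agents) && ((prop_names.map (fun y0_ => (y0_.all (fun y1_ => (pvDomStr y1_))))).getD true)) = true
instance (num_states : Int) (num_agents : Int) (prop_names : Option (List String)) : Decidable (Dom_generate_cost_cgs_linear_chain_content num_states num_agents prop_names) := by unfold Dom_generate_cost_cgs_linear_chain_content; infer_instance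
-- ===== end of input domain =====

-- B builds the whole model text by closed-form string arithmetic (string multiplication plus a
-- trailing-separator strip) instead of A's nested per-cell loops, dict accumulation and parts-list
-- join helper (objective: alternative; same asymptotic cost).

-- ===== PORT A =====
-- Python 's' * k (k : Int): max(k,0) copies of s, as A's port uses it ("".join of copies)
def pvStrMul (s : String) (k : Int) : String :=
  PySem.Str.join "" (List.replicate k.toNat s)

def pv_state_names (num_states : Int) : List String :=
  (PySem.List.pyRange 0 num_states 1).map (fun i => "s" ++ PySem.Int.toStr i)

def pv_unknown_transitions_grid (num_states : Int) : List String :=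
  let row := PySem.Str.join " " (List.replicate num_states.toNat "0")
  List.replicate num_states.toNat row

def pv_format_cgs_body (transitions unknown_transitions states : List String)
    (atomic_propositions : String) (labelling : List String) (num_agents : Int)
    (costs_for_actions : Option String) (extra_after_labelling : Option String) : String :=
  let parts := ["Transition", PySem.Str.join "\n" transitions,
    "Unknown_Transition_by", PySem.Str.join "\n" unknown_transitions,
    "Name_State", PySem.Str.join " " states, "Initial_State", "s0"]
  let parts := match costs_for_actions with
    | some c => parts ++ ["Costs_for_actions", c]
    | none => parts
  let parts := parts ++ ["Atomic_propositions", atomic_propositions,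
    "Labelling", PySem.Str.join "\n" labelling]
  let parts := match extra_after_labelling with
    | some e => parts ++ [e]
    | none => parts
  let parts := parts ++ ["Number_of_agents", PySem.Int.toStr num_agents]
  PySem.Str.join "\n" parts ++ "\n"

def generate_cost_cgs_linear_chain_content (num_states : Int) (num_agents : Int) (prop_names : Option (List String)) : String :=
  let prop_names := match prop_names with
    | none => ["p"]
    | some l => l
  let states := pv_state_names num_states
  let unknown_transitions := pv_unknown_transitions_grid num_states
  let transitions := (PySem.List.pyRange 0 num_states 1).foldl (fun acc i =>
    let row := (PySem.List.pyRange 0 num_states 1).foldl (fun r j =>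
      if j = i + 1 then r ++ [pvStrMul "AC" num_agents]
      else if j = i then r ++ [if i = num_states - 1 then "*" else "0"]
      else r ++ ["0"]) []
    acc ++ [PySem.Str.join " " row]) []
  let labelling := List.replicate num_states.toNat (List.replicate prop_names.length "0")
  -- labelling[0][0] = "1" ; labelling[-1][0] = "1"   (in-range under Pre_; pySetD/modify are the exact in-range updates)
  let labelling := labelling.modify 0 (fun r => PySem.List.pySetD r 0 "1")
  let labelling := labelling.modify (labelling.length - 1) (fun r => PySem.List.pySetD r 0 "1")
  let labelling_str := labelling.map (fun row => PySem.Str.join " " row)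
  let base_action := pvStrMul "AC" num_agents
  let cost_str := PySem.Str.join ":" (List.replicate num_agents.toNat "1")
  let action_costs : PySem.Dict String (List String) :=
    (PySem.List.pyRange 0 (num_states - 1) 1).foldl (fun d i =>
      let state_name := "s" ++ PySem.Int.toStr i
      let d := if d.contains base_action then d else d.insert base_action []
      d.modify base_action [] (fun l => l ++ [state_name ++ "$" ++ cost_str])) PySem.Dict.empty
  let action_costs := action_costs.insert "*" ["s" ++ PySem.Int.toStr (num_states - 1) ++ "$" ++ cost_str]
  let costs_lines := PySem.Str.join "\n"
    (action_costs.items.map (fun p => p.1 ++ " " ++ PySem.Str.join ";" p.2))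
  pv_format_cgs_body transitions unknown_transitions states
    (PySem.Str.join " " prop_names) labelling_str num_agents (some costs_lines) none

-- ===== PORT B =====
-- Python 's' * k as B uses it: the flattened list of max(k,0) copies of s's characters
def pvRep (s : String) (k : Int) : String :=
  String.ofList ((List.replicate k.toNat s.toList).flatten)

def generate_cost_cgs_linear_chain_content_alt (num_states : Int) (num_agents : Int) (prop_names : Option (List String)) : String :=
  let n := num_states
  let act := pvRep "AC" num_agents
  let cost := PySem.Str.slice (pvRep "1:" num_agents) none (some (-1))
  let trans := PySem.Str.join "\n" ((PySem.List.pyRange 0 n 1).map (fun i =>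
    if i = n - 1 then pvRep "0 " (n - 1) ++ "*"
    else pvRep "0 " (i + 1) ++ act ++ pvRep " 0" (n - 2 - i)))
  let zero_row := PySem.Str.slice (pvRep "0 " n) none (some (-1))
  let unknown := PySem.Str.slice (pvRep (zero_row ++ "\n") n) none (some (-1))
  let states := PySem.Str.slice (PySem.Str.join ""
    ((PySem.List.pyRange 0 n 1).map (fun i => " s" ++ PySem.Int.toStr i))) (some 1) none
  let star_line := "* s" ++ PySem.Int.toStr (n - 1) ++ "$" ++ cost
  let costs := if n > 1 then
      act ++ " " ++ PySem.Str.slice (PySem.Str.join ""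
        ((PySem.List.pyRange 0 (n - 1) 1).map (fun i =>
          "s" ++ PySem.Int.toStr i ++ "$" ++ cost ++ ";"))) none (some (-1)) ++ "\n" ++ star_line
    else star_line
  let pp : String × Nat := match prop_names with
    | none => ("p", 1)
    | some l => (PySem.Str.join " " l, l.length)
  let marked := "1" ++ pvRep " 0" ((pp.2 : Int) - 1)
  let plain := "0" ++ pvRep " 0" ((pp.2 : Int) - 1)
  let labels := if n = 1 then marked
    else marked ++ "\n" ++ pvRep (plain ++ "\n") (n - 2) ++ marked
  "Transition" ++ "\n" ++ trans ++ "\n" ++ "Unknown_Transition_by" ++ "\n" ++ unknown ++ "\n"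
    ++ "Name_State" ++ "\n" ++ states ++ "\n" ++ "Initial_State" ++ "\n" ++ "s0" ++ "\n"
    ++ "Costs_for_actions" ++ "\n" ++ costs ++ "\n" ++ "Atomic_propositions" ++ "\n" ++ pp.1 ++ "\n"
    ++ "Labelling" ++ "\n" ++ labels ++ "\n" ++ "Number_of_agents" ++ "\n" ++ PySem.Int.toStr num_agents ++ "\n"

-- ===== PRECONDITION & SPEC =====
-- Pre_ excludes exactly the inputs where A raises IndexError: num_states < 1 (labelling[0][0] on an
-- empty labelling) and an explicitly passed empty prop_names list (labelling[0][0] on an empty row).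
def Pre_generate_cost_cgs_linear_chain_content (num_states : Int) (num_agents : Int) (prop_names : Option (List String)) : Prop :=
  1 ≤ num_states ∧ prop_names ≠ some []
instance (num_states : Int) (num_agents : Int) (prop_names : Option (List String)) : Decidable (Pre_generate_cost_cgs_linear_chain_content num_states num_agents prop_names) := by unfold Pre_generate_cost_cgs_linear_chain_content; infer_instance

def pvWitness_generate_cost_cgs_linear_chain_content : Int × Int × Option (List String) := (2, 2, none)

def Spec_generate_cost_cgs_linear_chain_content (num_states : Int) (num_agents : Int) (prop_names : Option (List String)) (out : String) : Prop := out = generate_cost_cgs_linear_chain_content_alt num_states num_agents prop_names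
instance (num_states : Int) (num_agents : Int) (prop_names : Option (List String)) (out : String) : Decidable (Spec_generate_cost_cgs_linear_chain_content num_states num_agents prop_names out) := by unfold Spec_generate_cost_cgs_linear_chain_content; infer_instance

-- ===== CLAIM (what is proved, stated in full; the proofs are below) =====
def Claim_equal_generate_cost_cgs_linear_chain_content : Prop := ∀ (num_states : Int) (num_agents : Int) (prop_names : Option (List String)), Dom_generate_cost_cgs_linear_chain_content num_states num_agents prop_names → Pre_generate_cost_cgs_linear_chain_content num_states num_agents prop_names → Spec_generate_cost_cgs_linear_chain_content num_states num_agents prop_names (generate_cost_cgs_linear_chain_content num_states num_agents prop_names)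

-- ===== LEMMAS AND PROOFS =====

-- pvMid: proof-only intermediate program (B's strings described with joins over explicit row lists);
-- A = pvMid is proved with list/dict lemmas, pvMid = B with char-level string-arithmetic lemmas.
def pvMid (num_states : Int) (num_agents : Int) (prop_names : Option (List String)) : String :=
  let props := prop_names.getD ["p"]
  let n := num_states
  let action := pvStrMul "AC" num_agents
  let states := (PySem.List.pyRange 0 n 1).map (fun i => "s" ++ PySem.Int.toStr i)
  let trans_rows := (PySem.List.pyRange 0 n 1).foldl (fun acc i =>
    let row := List.replicate n.toNat "0"
    let row := if i = n - 1 then PySem.List.pySetD row i "*"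
               else PySem.List.pySetD row (i + 1) action
    acc ++ [PySem.Str.join " " row]) []
  let zero_row := PySem.Str.join " " (List.replicate n.toNat "0")
  let cost := PySem.Str.join ":" (List.replicate num_agents.toNat "1")
  let cost_lines := (if n > 1 then
      [action ++ " " ++ PySem.Str.join ";"
        ((PySem.List.pyRange 0 (n - 1) 1).map (fun i => "s" ++ PySem.Int.toStr i ++ "$" ++ cost))]
    else []) ++ ["* s" ++ PySem.Int.toStr (n - 1) ++ "$" ++ cost]
  let label_rows := (PySem.List.pyRange 0 n 1).foldl (fun acc i =>
    let cells := List.replicate props.length "0"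
    let cells := if i = 0 ∨ i = n - 1 then PySem.List.pySetD cells 0 "1" else cells
    acc ++ [PySem.Str.join " " cells]) []
  PySem.Str.join "\n"
    ["Transition", PySem.Str.join "\n" trans_rows,
     "Unknown_Transition_by", PySem.Str.join "\n" (List.replicate n.toNat zero_row),
     "Name_State", PySem.Str.join " " states,
     "Initial_State", "s0",
     "Costs_for_actions", PySem.Str.join "\n" cost_lines,
     "Atomic_propositions", PySem.Str.join " " props,
     "Labelling", PySem.Str.join "\n" label_rows,
     "Number_of_agents", PySem.Int.toStr num_agents] ++ "\n"

-- ---- part 1: A = pvMid (list/dict reasoning) ----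

-- general fact: intercalate with empty separator prepends the head block
theorem pv_intercalate_nil_cons (a : List Char) (rest : List (List Char)) :
    ([] : List Char).intercalate (a :: rest) = a ++ ([] : List Char).intercalate rest := by
  simp [List.intercalate]
  induction rest generalizing a <;> simp_all [List.intersperse]

theorem pvStrMul_ne_star (k : Int) : pvStrMul "AC" k ≠ "*" := by
  intro h
  have h' := congrArg String.toList h
  rw [pvStrMul, PySem.Str.toList_join] at h'
  cases hm : k.toNat with
  | zero => rw [hm] at h'; simp [PySem.Chars.join, List.intercalate] at h'
  | succ m =>
    rw [hm] at h'
    simp [PySem.Chars.join, List.replicate_succ, pv_intercalate_nil_cons] at h'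

theorem pv_join_singleton (x : String) : PySem.Str.join ";" [x] = x := by
  apply String.toList_inj.mp
  simp [PySem.Str.toList_join]

theorem pv_star_line (t c : String) :
    "*" ++ " " ++ ("s" ++ t ++ "$" ++ c) = "* s" ++ t ++ "$" ++ c := by
  apply String.toList_inj.mp
  simp [String.append_assoc]

theorem pv_trans_eq (n : Int) (act : String) :
    ((PySem.List.pyRange 0 n 1).foldl (fun acc i =>
        acc ++ [PySem.Str.join " " ((PySem.List.pyRange 0 n 1).foldl (fun r j =>
          if j = i + 1 then r ++ [act]
          else if j = i then r ++ [if i = n - 1 then "*" else "0"]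
          else r ++ ["0"]) [])]) []) =
    ((PySem.List.pyRange 0 n 1).foldl (fun acc i =>
        acc ++ [PySem.Str.join " " (if i = n - 1 then PySem.List.pySetD (List.replicate n.toNat "0") i "*"
          else PySem.List.pySetD (List.replicate n.toNat "0") (i + 1) act)]) []) := by
  rw [PySem.List.foldl_append_singleton_eq_map, PySem.List.foldl_append_singleton_eq_map]
  apply List.map_congr_left
  intro i hi
  rw [PySem.List.mem_pyRange_one] at hi
  congr 1
  have hbody : (fun (r : List String) j =>
      if j = i + 1 then r ++ [act]
      else if j = i then r ++ [if i = n - 1 then "*" else "0"]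
      else r ++ ["0"]) = (fun (r : List String) j =>
      r ++ [if j = i + 1 then act else if j = i then (if i = n - 1 then "*" else "0") else "0"]) := by
    funext r j; split_ifs <;> rfl
  rw [hbody, PySem.List.foldl_append_singleton_eq_map, List.nil_append,
    PySem.List.pyRange_zero, List.map_map]
  by_cases hlast : i = n - 1
  · rw [if_pos hlast, if_pos hlast, PySem.List.pySetD_of_nonneg _ _ hi.1]
    apply List.ext_getElem
    · simp
    · intro k hk1 hk2
      have hk' : k < n.toNat := by simpa using hk1
      simp only [List.getElem_map, List.getElem_range, Function.comp_apply,
        List.getElem_set, List.getElem_replicate]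
      split_ifs <;> first | rfl | (exfalso; omega)
  · rw [if_neg hlast, if_neg hlast, PySem.List.pySetD_of_nonneg _ _ (by omega : (0:Int) ≤ i + 1)]
    apply List.ext_getElem
    · simp
    · intro k hk1 hk2
      have hk' : k < n.toNat := by simpa using hk1
      simp only [List.getElem_map, List.getElem_range, Function.comp_apply,
        List.getElem_set, List.getElem_replicate]
      split_ifs <;> first | rfl | (exfalso; omega)

theorem pv_label_eq (n : Int) (p : Nat) :
    (((List.replicate n.toNat (List.replicate p "0")).modify 0 (fun r => PySem.List.pySetD r 0 "1")).modify
        (((List.replicate n.toNat (List.replicate p "0")).modify 0 (fun r => PySem.List.pySetD r 0 "1")).length - 1)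
        (fun r => PySem.List.pySetD r 0 "1")).map (fun row => PySem.Str.join " " row) =
    (PySem.List.pyRange 0 n 1).foldl (fun acc i =>
      acc ++ [PySem.Str.join " " (if i = 0 ∨ i = n - 1 then PySem.List.pySetD (List.replicate p "0") 0 "1"
        else List.replicate p "0")]) [] := by
  rw [PySem.List.foldl_append_singleton_eq_map, List.nil_append, PySem.List.pyRange_zero, List.map_map]
  suffices h : (((List.replicate n.toNat (List.replicate p "0")).modify 0 (fun r => PySem.List.pySetD r 0 "1")).modify
        (((List.replicate n.toNat (List.replicate p "0")).modify 0 (fun r => PySem.List.pySetD r 0 "1")).length - 1)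
        (fun r => PySem.List.pySetD r 0 "1")) =
      (List.range n.toNat).map (fun k => if ((k : Nat) : Int) = 0 ∨ ((k : Nat) : Int) = n - 1
        then PySem.List.pySetD (List.replicate p "0") 0 "1" else List.replicate p "0") by
    rw [h, List.map_map]
    rfl
  apply List.ext_getElem
  · simp
  · intro k hk1 hk2
    have hk' : k < n.toNat := by simpa using hk1
    simp only [List.getElem_map, List.getElem_range, List.getElem_modify,
      List.length_modify, List.length_replicate, List.getElem_replicate,
      PySem.List.pySetD_of_nonneg _ _ (le_refl (0:Int)), Int.toNat_zero]
    split_ifs <;> first | rfl | (exfalso; omega) | (rw [List.set_set])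

theorem pv_dict_fold (xs : List Int) (base cost : String) (l : List String) :
    xs.foldl (fun d i =>
        (if d.contains base then d else d.insert base []).modify base []
          (fun l => l ++ [("s" ++ PySem.Int.toStr i) ++ "$" ++ cost])) (PySem.Dict.mk [(base, l)]) =
      PySem.Dict.mk [(base, l ++ xs.map (fun i => "s" ++ PySem.Int.toStr i ++ "$" ++ cost))] := by
  induction xs generalizing l with
  | nil => simp
  | cons x rest ih =>
    simp only [List.foldl_cons]
    have hstep : ((if (PySem.Dict.mk [(base, l)]).contains base then (PySem.Dict.mk [(base, l)])
          else (PySem.Dict.mk [(base, l)]).insert base []).modify base []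
          (fun l => l ++ [("s" ++ PySem.Int.toStr x) ++ "$" ++ cost])) =
        PySem.Dict.mk [(base, l ++ ["s" ++ PySem.Int.toStr x ++ "$" ++ cost])] := by
      simp [PySem.Dict.modify, PySem.Dict.insert, PySem.Dict.getD, PySem.Dict.get?,
        PySem.Dict.contains]
    rw [hstep, ih]
    simp

theorem pv_costs_eq (n : Int) (base cost : String) (hb : base ≠ "*") (h1 : 1 ≤ n) :
    PySem.Str.join "\n" ((((PySem.List.pyRange 0 (n - 1) 1).foldl (fun d i =>
        (if d.contains base then d else d.insert base []).modify base []
          (fun l => l ++ [("s" ++ PySem.Int.toStr i) ++ "$" ++ cost])) PySem.Dict.empty).insert "*"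
          ["s" ++ PySem.Int.toStr (n - 1) ++ "$" ++ cost]).items.map
        (fun p => p.1 ++ " " ++ PySem.Str.join ";" p.2)) =
    PySem.Str.join "\n" ((if n > 1 then
        [base ++ " " ++ PySem.Str.join ";"
          ((PySem.List.pyRange 0 (n - 1) 1).map (fun i => "s" ++ PySem.Int.toStr i ++ "$" ++ cost))]
      else []) ++ ["* s" ++ PySem.Int.toStr (n - 1) ++ "$" ++ cost]) := by
  by_cases hgt : 1 < n
  · rw [if_pos hgt]
    have hr : PySem.List.pyRange 0 (n - 1) 1 = 0 :: PySem.List.pyRange (0 + 1) (n - 1) 1 :=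
      PySem.List.pyRange_one_cons (by omega)
    rw [hr]
    simp only [List.foldl_cons]
    have hstep0 : ((if (PySem.Dict.empty : PySem.Dict String (List String)).contains base
          then (PySem.Dict.empty : PySem.Dict String (List String))
          else PySem.Dict.empty.insert base []).modify base []
          (fun l => l ++ [("s" ++ PySem.Int.toStr 0) ++ "$" ++ cost])) =
        PySem.Dict.mk [(base, ["s" ++ PySem.Int.toStr 0 ++ "$" ++ cost])] := by
      simp [PySem.Dict.modify, PySem.Dict.insert, PySem.Dict.getD, PySem.Dict.get?,
        PySem.Dict.contains, PySem.Dict.empty]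
    rw [hstep0, pv_dict_fold]
    have hins : ((PySem.Dict.mk [(base, ["s" ++ PySem.Int.toStr 0 ++ "$" ++ cost] ++
          (PySem.List.pyRange (0 + 1) (n - 1) 1).map (fun i => "s" ++ PySem.Int.toStr i ++ "$" ++ cost))]).insert "*"
          ["s" ++ PySem.Int.toStr (n - 1) ++ "$" ++ cost]).items =
        [(base, ["s" ++ PySem.Int.toStr 0 ++ "$" ++ cost] ++
          (PySem.List.pyRange (0 + 1) (n - 1) 1).map (fun i => "s" ++ PySem.Int.toStr i ++ "$" ++ cost)),
         ("*", ["s" ++ PySem.Int.toStr (n - 1) ++ "$" ++ cost])] := by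
      simp [PySem.Dict.insert, PySem.Dict.contains, hb]
    rw [hins]
    simp only [List.map_cons, List.map_nil]
    rw [pv_join_singleton, pv_star_line]
    rfl
  · have hn : n = 1 := by omega
    subst hn
    rw [if_neg (by omega)]
    rw [show PySem.List.pyRange 0 (1 - 1) 1 = [] from PySem.List.pyRange_one_eq_nil (by omega)]
    simp only [List.foldl_nil]
    have hins : (((PySem.Dict.empty : PySem.Dict String (List String))).insert "*"
          ["s" ++ PySem.Int.toStr (1 - 1) ++ "$" ++ cost]).items =
        [("*", ["s" ++ PySem.Int.toStr (1 - 1) ++ "$" ++ cost])] := by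
      simp [PySem.Dict.insert, PySem.Dict.contains, PySem.Dict.empty]
    rw [hins]
    simp only [List.map_cons, List.map_nil, List.nil_append]
    rw [pv_join_singleton, pv_star_line]

theorem pv_A_eq_mid (num_states : Int) (num_agents : Int) (prop_names : Option (List String))
    (h1 : 1 ≤ num_states) (h2 : prop_names ≠ some []) :
    generate_cost_cgs_linear_chain_content num_states num_agents prop_names =
    pvMid num_states num_agents prop_names := by
  simp only [generate_cost_cgs_linear_chain_content, pvMid,
    pv_state_names, pv_unknown_transitions_grid, pv_format_cgs_body]
  cases prop_names with
  | none =>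
    simp only [Option.getD]
    rw [pv_trans_eq, pv_label_eq, pv_costs_eq num_states (pvStrMul "AC" num_agents)
      (PySem.Str.join ":" (List.replicate num_agents.toNat "1")) (pvStrMul_ne_star num_agents) h1]
    rfl
  | some l =>
    simp only [Option.getD]
    rw [pv_trans_eq, pv_label_eq, pv_costs_eq num_states (pvStrMul "AC" num_agents)
      (PySem.Str.join ":" (List.replicate num_agents.toNat "1")) (pvStrMul_ne_star num_agents) h1]
    rfl

-- ---- part 2: pvMid = B (char-level string arithmetic) ----

theorem pv_join_cons_ne (x : Char) (a : List Char) (t : List (List Char)) (h : t ≠ []) :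
    PySem.Chars.join [x] (a :: t) = a ++ [x] ++ PySem.Chars.join [x] t := by
  cases t with
  | nil => exact absurd rfl h
  | cons b t' => exact PySem.Chars.join_cons_cons ..

theorem pv_join_nil_flatten (l : List (List Char)) :
    PySem.Chars.join [] l = l.flatten := by
  induction l with
  | nil => simp [PySem.Chars.join_nil]
  | cons a t ih =>
    cases t with
    | nil => simp [PySem.Chars.join_singleton]
    | cons b t' => rw [PySem.Chars.join_cons_cons, List.flatten_cons, ← ih]; simp

theorem pv_flat_suffix {α : Type} (x : Char) (f : α → List Char) (l : List α) (h : l ≠ []) :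
    (l.map (fun a => f a ++ [x])).flatten = PySem.Chars.join [x] (l.map f) ++ [x] := by
  induction l with
  | nil => exact absurd rfl h
  | cons a t ih =>
    cases t with
    | nil => simp [PySem.Chars.join_singleton]
    | cons b t' =>
      rw [List.map_cons, List.flatten_cons, ih (by simp)]
      simp only [List.map_cons, PySem.Chars.join_cons_cons]
      simp

theorem pv_flat_prefix {α : Type} (x : Char) (f : α → List Char) (l : List α) (h : l ≠ []) :
    (l.map (fun a => x :: f a)).flatten = x :: PySem.Chars.join [x] (l.map f) := by
  induction l with
  | nil => exact absurd rfl h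
  | cons a t ih =>
    cases t with
    | nil => simp [PySem.Chars.join_singleton]
    | cons b t' =>
      rw [List.map_cons, List.flatten_cons, ih (by simp)]
      simp only [List.map_cons, PySem.Chars.join_cons_cons]
      simp

theorem pv_join_cons_rep (x : Char) (h c : List Char) (m : Nat) :
    PySem.Chars.join [x] (h :: List.replicate m c) = h ++ (List.replicate m ([x] ++ c)).flatten := by
  induction m generalizing h with
  | zero => simp [PySem.Chars.join_singleton]
  | succ m ih =>
    rw [List.replicate_succ, PySem.Chars.join_cons_cons, ih c, List.replicate_succ,
      List.flatten_cons]
    simp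

theorem pv_rep_dropLast (c : List Char) (x : Char) (m : Nat) :
    ((List.replicate m (c ++ [x])).flatten).dropLast = PySem.Chars.join [x] (List.replicate m c) := by
  cases m with
  | zero => simp [PySem.Chars.join_nil]
  | succ m =>
    have h : (List.replicate (m+1) (c ++ [x])).flatten =
        PySem.Chars.join [x] (List.replicate (m+1) c) ++ [x] := by
      have := pv_flat_suffix x (fun _ : Unit => c) (List.replicate (m+1) ()) (by simp)
      simpa [List.map_replicate] using this
    rw [h, List.dropLast_concat]

theorem pv_join_set (x : Char) (c d : List Char) (m j : Nat) (hj : j < m) :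
    PySem.Chars.join [x] ((List.replicate m c).set j d) =
      (List.replicate j (c ++ [x])).flatten ++ d ++ (List.replicate (m - 1 - j) ([x] ++ c)).flatten := by
  induction j generalizing m with
  | zero =>
    cases m with
    | zero => omega
    | succ m => rw [List.replicate_succ, List.set_cons_zero, pv_join_cons_rep]; simp
  | succ j ih =>
    cases m with
    | zero => omega
    | succ m =>
      rw [List.replicate_succ, List.set_cons_succ,
        pv_join_cons_ne x c _ (by simp; omega), ih m (by omega)]
      have he : m - 1 - j = m - (j + 1) := by omega
      simp [List.replicate_succ, he]

theorem pv_join_mid (x : Char) (M P M' : List Char) (k : Nat) :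
    PySem.Chars.join [x] (M :: (List.replicate k P ++ [M'])) =
      M ++ [x] ++ (List.replicate k (P ++ [x])).flatten ++ M' := by
  induction k generalizing M with
  | zero => rw [List.replicate, List.nil_append, PySem.Chars.join_cons_cons, PySem.Chars.join_singleton]; simp
  | succ k ih =>
    rw [List.replicate_succ, List.cons_append, PySem.Chars.join_cons_cons, ih P]
    simp [List.replicate_succ]

theorem pv_mul_eq_rep (s : String) (k : Int) : pvStrMul s k = pvRep s k := by
  apply String.toList_inj.mp
  rw [pvStrMul, PySem.Str.toList_join]
  simp [pvRep, pv_join_nil_flatten, List.map_replicate]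

theorem pv_repsep (c sep : String) (x : Char) (hs : sep.toList = [x])
    (csep : String) (hc : csep.toList = c.toList ++ [x]) (k : Int) :
    PySem.Str.slice (pvRep csep k) none (some (-1)) =
      PySem.Str.join sep (List.replicate k.toNat c) := by
  apply String.toList_inj.mp
  rw [PySem.Str.toList_join, hs]
  have h1 : (PySem.Str.slice (pvRep csep k) none (some (-1))).toList
      = (pvRep csep k).toList.dropLast := by
    simp [PySem.List.slice_to_neg_one]
  rw [h1]
  simp only [pvRep, String.toList_ofList, hc]
  rw [pv_rep_dropLast, List.map_replicate]

theorem pv_map_dropLast {α : Type} (x : Char) (f : α → List Char) (l : List α) (h : l ≠ []) :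
    ((l.map (fun a => f a ++ [x])).flatten).dropLast = PySem.Chars.join [x] (l.map f) := by
  rw [pv_flat_suffix x f l h, List.dropLast_concat]

theorem pv_join_two (a b : String) : PySem.Str.join "\n" [a, b] = a ++ "\n" ++ b := by
  apply String.toList_inj.mp
  rw [PySem.Str.toList_join]
  simp [PySem.Chars.join_cons_cons, PySem.Chars.join_singleton]

theorem pv_join_one (sep x : String) : PySem.Str.join sep [x] = x := by
  apply String.toList_inj.mp
  rw [PySem.Str.toList_join]
  simp [PySem.Chars.join_singleton]

theorem pv_row_eq (n : Int) (i : Int) (act : String) (h0 : 0 ≤ i) (hn : i < n) :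
    PySem.Str.join " " (if i = n - 1 then PySem.List.pySetD (List.replicate n.toNat "0") i "*"
        else PySem.List.pySetD (List.replicate n.toNat "0") (i + 1) act) =
      (if i = n - 1 then pvRep "0 " (n - 1) ++ "*"
        else pvRep "0 " (i + 1) ++ act ++ pvRep " 0" (n - 2 - i)) := by
  by_cases hlast : i = n - 1
  · rw [if_pos hlast, if_pos hlast, PySem.List.pySetD_of_nonneg _ _ h0]
    apply String.toList_inj.mp
    rw [PySem.Str.toList_join]
    simp only [List.map_set, List.map_replicate]
    have hj : i.toNat < n.toNat := by omega
    rw [show (" " : String).toList = [' '] from rfl]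
    rw [pv_join_set ' ' "0".toList "*".toList n.toNat i.toNat hj]
    have h1 : n.toNat - 1 - i.toNat = 0 := by omega
    have h2 : (n - 1).toNat = i.toNat := by omega
    simp [pvRep, h1, h2]
  · rw [if_neg hlast, if_neg hlast,
      PySem.List.pySetD_of_nonneg _ _ (by omega : (0:Int) ≤ i + 1)]
    apply String.toList_inj.mp
    rw [PySem.Str.toList_join]
    simp only [List.map_set, List.map_replicate]
    have hj : (i + 1).toNat < n.toNat := by omega
    rw [show (" " : String).toList = [' '] from rfl]
    rw [pv_join_set ' ' "0".toList act.toList n.toNat (i + 1).toNat hj]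
    have h1 : (i + 1).toNat = i.toNat + 1 := by omega
    have h2 : n.toNat - 1 - (i.toNat + 1) = (n - 2 - i).toNat := by omega
    simp [pvRep, h1, h2]

theorem pv_states_eq (n : Int) (h : 1 ≤ n) :
    PySem.Str.slice (PySem.Str.join ""
        ((PySem.List.pyRange 0 n 1).map (fun i => " s" ++ PySem.Int.toStr i))) (some 1) none =
      PySem.Str.join " " ((PySem.List.pyRange 0 n 1).map (fun i => "s" ++ PySem.Int.toStr i)) := by
  apply String.toList_inj.mp
  have htail : (PySem.Str.slice (PySem.Str.join ""
      ((PySem.List.pyRange 0 n 1).map (fun i => " s" ++ PySem.Int.toStr i))) (some 1) none).toList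
      = (PySem.Str.join "" ((PySem.List.pyRange 0 n 1).map (fun i => " s" ++ PySem.Int.toStr i))).toList.tail := by
    simp [PySem.List.slice_from_one]
  rw [htail, PySem.Str.toList_join, PySem.Str.toList_join]
  rw [show ("" : String).toList = [] from rfl, show (" " : String).toList = [' '] from rfl]
  rw [pv_join_nil_flatten, List.map_map, List.map_map]
  have hmap : ((PySem.List.pyRange 0 n 1).map (String.toList ∘ fun i => " s" ++ PySem.Int.toStr i)) =
      ((PySem.List.pyRange 0 n 1).map (fun i => ' ' :: ('s' :: PySem.Int.toChars i))) := by
    apply List.map_congr_left; intro i _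
    simp [PySem.Int.toList_toStr]
  have hmap2 : ((PySem.List.pyRange 0 n 1).map (String.toList ∘ fun i => "s" ++ PySem.Int.toStr i)) =
      ((PySem.List.pyRange 0 n 1).map (fun i => 's' :: PySem.Int.toChars i)) := by
    apply List.map_congr_left; intro i _
    simp [PySem.Int.toList_toStr]
  rw [hmap, hmap2]
  have hne : PySem.List.pyRange 0 n 1 ≠ [] := by
    rw [PySem.List.pyRange_one_cons (by omega)]; simp
  rw [pv_flat_prefix ' ' (fun i => 's' :: PySem.Int.toChars i) _ hne]
  simp

theorem pv_entries_eq (n : Int) (cost : String) (h : 1 < n) :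
    PySem.Str.slice (PySem.Str.join ""
        ((PySem.List.pyRange 0 (n - 1) 1).map (fun i =>
          "s" ++ PySem.Int.toStr i ++ "$" ++ cost ++ ";"))) none (some (-1)) =
      PySem.Str.join ";" ((PySem.List.pyRange 0 (n - 1) 1).map (fun i =>
        "s" ++ PySem.Int.toStr i ++ "$" ++ cost)) := by
  apply String.toList_inj.mp
  have hdl : (PySem.Str.slice (PySem.Str.join ""
      ((PySem.List.pyRange 0 (n - 1) 1).map (fun i =>
        "s" ++ PySem.Int.toStr i ++ "$" ++ cost ++ ";"))) none (some (-1))).toList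
      = (PySem.Str.join "" ((PySem.List.pyRange 0 (n - 1) 1).map (fun i =>
        "s" ++ PySem.Int.toStr i ++ "$" ++ cost ++ ";"))).toList.dropLast := by
    simp [PySem.List.slice_to_neg_one]
  rw [hdl, PySem.Str.toList_join, PySem.Str.toList_join]
  rw [show ("" : String).toList = [] from rfl, show (";" : String).toList = [';'] from rfl]
  rw [pv_join_nil_flatten, List.map_map, List.map_map]
  have hmap : ((PySem.List.pyRange 0 (n - 1) 1).map (String.toList ∘ fun i => "s" ++ PySem.Int.toStr i ++ "$" ++ cost ++ ";")) =
      ((PySem.List.pyRange 0 (n - 1) 1).map (fun i =>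
        ('s' :: PySem.Int.toChars i ++ '$' :: cost.toList) ++ [';'])) := by
    apply List.map_congr_left; intro i _
    simp [PySem.Int.toList_toStr]
  have hmap2 : ((PySem.List.pyRange 0 (n - 1) 1).map (String.toList ∘ fun i => "s" ++ PySem.Int.toStr i ++ "$" ++ cost)) =
      ((PySem.List.pyRange 0 (n - 1) 1).map (fun i => 's' :: PySem.Int.toChars i ++ '$' :: cost.toList)) := by
    apply List.map_congr_left; intro i _
    simp [PySem.Int.toList_toStr]
  have hne : PySem.List.pyRange 0 (n - 1) 1 ≠ [] := by
    rw [PySem.List.pyRange_one_cons (by omega)]; simp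
  rw [hmap, hmap2, pv_map_dropLast ';' (fun i => 's' :: PySem.Int.toChars i ++ '$' :: cost.toList) _ hne]

theorem pv_marked_eq (p : Nat) (hp : 1 ≤ p) :
    PySem.Str.join " " (PySem.List.pySetD (List.replicate p "0") 0 "1") =
      "1" ++ pvRep " 0" ((p : Int) - 1) := by
  apply String.toList_inj.mp
  rw [PySem.List.pySetD_of_nonneg _ _ (le_refl (0:Int)), PySem.Str.toList_join]
  simp only [Int.toNat_zero, List.map_set, List.map_replicate]
  obtain ⟨q, rfl⟩ : ∃ q, p = q + 1 := ⟨p - 1, by omega⟩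
  rw [List.replicate_succ, List.set_cons_zero,
    show (" " : String).toList = [' '] from rfl, pv_join_cons_rep]
  simp [pvRep]

theorem pv_plain_eq (p : Nat) (hp : 1 ≤ p) :
    PySem.Str.join " " (List.replicate p "0") = "0" ++ pvRep " 0" ((p : Int) - 1) := by
  apply String.toList_inj.mp
  rw [PySem.Str.toList_join]
  simp only [List.map_replicate]
  obtain ⟨q, rfl⟩ : ∃ q, p = q + 1 := ⟨p - 1, by omega⟩
  rw [List.replicate_succ, show (" " : String).toList = [' '] from rfl, pv_join_cons_rep]
  simp [pvRep]

theorem pv_join_mid_str (M P M' : String) (k : Int) :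
    PySem.Str.join "\n" (M :: (List.replicate k.toNat P ++ [M'])) =
      M ++ "\n" ++ pvRep (P ++ "\n") k ++ M' := by
  apply String.toList_inj.mp
  rw [PySem.Str.toList_join, show ("\n" : String).toList = ['\n'] from rfl]
  rw [List.map_cons, List.map_append, List.map_replicate, List.map_cons, List.map_nil]
  rw [pv_join_mid]
  simp [pvRep]

theorem pv_labels_list (n : Int) (hn : 2 ≤ n) (M P : String) :
    (PySem.List.pyRange 0 n 1).map (fun i => if i = 0 ∨ i = n - 1 then M else P) =
      M :: (List.replicate (n - 2).toNat P ++ [M]) := by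
  rw [PySem.List.pyRange_zero, List.map_map]
  apply List.ext_getElem
  · simp; omega
  · intro j hj1 hj2
    have hj : j < n.toNat := by simpa using hj1
    simp only [List.getElem_map, List.getElem_range, Function.comp_apply]
    rcases Nat.eq_zero_or_pos j with hz | hpos
    · subst hz
      simp
    · have hcond : ((j : Int) = 0 ∨ (j : Int) = n - 1) ↔ (j = n.toNat - 1) := by omega
      by_cases hl : j = n.toNat - 1
      · rw [if_pos (hcond.mpr hl)]
        have : j = ((n-2).toNat + 1) := by omega
        subst this
        simp [List.getElem_cons, List.getElem_append_right, List.length_replicate]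
      · rw [if_neg (fun hc => hl (hcond.mp hc))]
        have hjlt : j - 1 < (n - 2).toNat := by omega
        rw [List.getElem_cons]
        simp only [hpos.ne', dite_false]
        rw [List.getElem_append_left (by simpa using hjlt), List.getElem_replicate]

theorem pv_labels_eq (n : Int) (p : Nat) (hn : 1 ≤ n) (hp : 1 ≤ p) :
    PySem.Str.join "\n" ((PySem.List.pyRange 0 n 1).foldl (fun acc i =>
        acc ++ [PySem.Str.join " " (if i = 0 ∨ i = n - 1
          then PySem.List.pySetD (List.replicate p "0") 0 "1" else List.replicate p "0")]) []) =
      (if n = 1 then "1" ++ pvRep " 0" ((p : Int) - 1)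
       else ("1" ++ pvRep " 0" ((p : Int) - 1)) ++ "\n"
         ++ pvRep (("0" ++ pvRep " 0" ((p : Int) - 1)) ++ "\n") (n - 2)
         ++ ("1" ++ pvRep " 0" ((p : Int) - 1))) := by
  rw [PySem.List.foldl_append_singleton_eq_map, List.nil_append]
  have hker : ∀ i : Int, PySem.Str.join " " (if i = 0 ∨ i = n - 1
      then PySem.List.pySetD (List.replicate p "0") 0 "1" else List.replicate p "0") =
      (if i = 0 ∨ i = n - 1 then PySem.Str.join " " (PySem.List.pySetD (List.replicate p "0") 0 "1")
       else PySem.Str.join " " (List.replicate p "0")) := by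
    intro i; split_ifs <;> rfl
  simp only [hker]
  by_cases h1 : n = 1
  · subst h1
    rw [if_pos rfl]
    rw [show PySem.List.pyRange 0 1 1 = [0] by
      rw [PySem.List.pyRange_one_cons (by omega)]
      rw [PySem.List.pyRange_one_eq_nil (by omega)]]
    simp only [List.map_cons, List.map_nil]
    simp only [true_or, if_true, pv_join_one]
    exact pv_marked_eq p hp
  · rw [if_neg h1]
    rw [pv_labels_list n (by omega)]
    rw [pv_join_mid_str]
    rw [pv_marked_eq p hp, pv_plain_eq p hp]

theorem pv_assemble (a1 a2 a3 a4 a5 a6 a7 a8 a9 a10 a11 a12 a13 a14 a15 a16 : String) :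
    PySem.Str.join "\n" [a1, a2, a3, a4, a5, a6, a7, a8, a9, a10, a11, a12, a13, a14, a15, a16] ++ "\n" =
      a1 ++ "\n" ++ a2 ++ "\n" ++ a3 ++ "\n" ++ a4 ++ "\n" ++ a5 ++ "\n" ++ a6 ++ "\n" ++ a7 ++ "\n"
        ++ a8 ++ "\n" ++ a9 ++ "\n" ++ a10 ++ "\n" ++ a11 ++ "\n" ++ a12 ++ "\n" ++ a13 ++ "\n"
        ++ a14 ++ "\n" ++ a15 ++ "\n" ++ a16 ++ "\n" := by
  apply String.toList_inj.mp
  simp [PySem.Str.toList_join, PySem.Chars.join_cons_cons, PySem.Chars.join_singleton]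

theorem pv_trans_block (n : Int) (act : String) :
    PySem.Str.join "\n" ((PySem.List.pyRange 0 n 1).foldl (fun acc i =>
      acc ++ [PySem.Str.join " " (if i = n - 1 then PySem.List.pySetD (List.replicate n.toNat "0") i "*"
        else PySem.List.pySetD (List.replicate n.toNat "0") (i + 1) act)]) []) =
    PySem.Str.join "\n" ((PySem.List.pyRange 0 n 1).map (fun i =>
      if i = n - 1 then pvRep "0 " (n - 1) ++ "*"
      else pvRep "0 " (i + 1) ++ act ++ pvRep " 0" (n - 2 - i))) := by
  rw [PySem.List.foldl_append_singleton_eq_map, List.nil_append]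
  congr 1
  apply List.map_congr_left
  intro i hi
  rw [PySem.List.mem_pyRange_one] at hi
  exact pv_row_eq n i act hi.1 hi.2

theorem pv_mid_eq_alt (num_states : Int) (num_agents : Int) (prop_names : Option (List String))
    (h1 : 1 ≤ num_states) (h2 : prop_names ≠ some []) :
    pvMid num_states num_agents prop_names =
    generate_cost_cgs_linear_chain_content_alt num_states num_agents prop_names := by
  have hp : 1 ≤ (prop_names.getD ["p"]).length := by
    cases prop_names with
    | none => simp
    | some l => cases l with
      | nil => exact absurd rfl h2
      | cons a t => simp
  simp only [pvMid, generate_cost_cgs_linear_chain_content_alt]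
  rw [pv_mul_eq_rep]
  rw [pv_trans_block]
  rw [show PySem.Str.join ":" (List.replicate num_agents.toNat "1") =
      PySem.Str.slice (pvRep "1:" num_agents) none (some (-1)) from
    (pv_repsep "1" ":" ':' rfl "1:" rfl num_agents).symm]
  rw [show PySem.Str.join " " (List.replicate num_states.toNat "0") =
      PySem.Str.slice (pvRep "0 " num_states) none (some (-1)) from
    (pv_repsep "0" " " ' ' rfl "0 " rfl num_states).symm]
  rw [show PySem.Str.join "\n" (List.replicate num_states.toNat
        (PySem.Str.slice (pvRep "0 " num_states) none (some (-1)))) =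
      PySem.Str.slice (pvRep ((PySem.Str.slice (pvRep "0 " num_states) none (some (-1))) ++ "\n") num_states) none (some (-1)) from
    (pv_repsep _ "\n" '\n' rfl _ (by simp) num_states).symm]
  rw [← pv_states_eq num_states h1]
  rw [pv_labels_eq num_states _ h1 hp]
  -- costs block
  by_cases hgt : num_states > 1
  · rw [if_pos hgt, if_pos hgt, List.singleton_append, pv_join_two,
      ← pv_entries_eq num_states _ hgt]
    cases prop_names with
    | none =>
      simp only [Option.getD]
      rw [show PySem.Str.join " " ["p"] = "p" from pv_join_one " " "p"]
      rw [pv_assemble]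
      norm_num
    | some l =>
      simp only [Option.getD]
      rw [pv_assemble]
  · rw [if_neg hgt, if_neg hgt, List.nil_append, pv_join_one]
    cases prop_names with
    | none =>
      simp only [Option.getD]
      rw [show PySem.Str.join " " ["p"] = "p" from pv_join_one " " "p"]
      rw [pv_assemble]
      norm_num
    | some l =>
      simp only [Option.getD]
      rw [pv_assemble]

-- ===== VERDICT (by name: the statement is the Claim_ definition above) =====
set_option maxHeartbeats 1000000 in
theorem generate_cost_cgs_linear_chain_content_spec : Claim_equal_generate_cost_cgs_linear_chain_content := by
  intro n a p _ hpre
  unfold Spec_generate_cost_cgs_linear_chain_content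
  rw [pv_A_eq_mid n a p hpre.1 hpre.2, pv_mid_eq_alt n a p hpre.1 hpre.2]
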